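-- pv_equiv track=rewrite | github.com/redbuilding/osoba | backend/services/heartbeat_service.py | _parse_insight
-- ===== SOURCE A (Python) =====
-- from typing import Optional, Dict, Any, List
--
-- def _parse_insight(response: str) -> Dict[str, Any]:
--     """Parse LLM response into insight data."""
--     # Simple parsing - look for Title: and Description:
--     title = "Proactive Suggestion"
--     description = response
--
--     lines = response.split("\n")
--     for i, line in enumerate(lines):
--         if line.strip().lower().startswith("title:"):
--             title = line.split(":", 1)[1].strip()
--         elif line.strip().lower().startswith("description:"):
--             # Get description and any following lines
--             desc_lines = [line.split(":", 1)[1].strip()]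
--             for j in range(i + 1, len(lines)):
--                 if lines[j].strip() and not lines[j].strip().lower().startswith("title:"):
--                     desc_lines.append(lines[j].strip())
--             description = " ".join(desc_lines)
--             break
--
--     return {
--         "insight_type": "task_suggestion",
--         "title": title[:200],  # Enforce max length
--         "description": description[:1000]  # Enforce max length
--     }
-- ===== SOURCE B (Python) =====
-- def _parse_insight(response: str):
--     """Parse LLM response into insight data (single forward search + backward title scan)."""
--     lines = response.split("\n")
--
--     def after(ln):
--         return ln.split(":", 1)[1].strip()
--
--     di = next((i for i, ln in enumerate(lines)
--                if ln.strip().lower().startswith("description:")), None)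
--
--     scope = lines if di is None else lines[:di]
--     title = "Proactive Suggestion"
--     for ln in reversed(scope):
--         if ln.strip().lower().startswith("title:"):
--             title = after(ln)
--             break
--
--     if di is None:
--         description = response
--     else:
--         stripped = (ln.strip() for ln in lines[di + 1:])
--         description = " ".join(
--             [after(lines[di])]
--             + [s for s in stripped if s and not s.lower().startswith("title:")])
--
--     return {
--         "insight_type": "task_suggestion",
--         "title": title[:200],
--         "description": description[:1000],
--     }
-- ===== Notes on version B (the rewrite author's own statement) =====
-- stated objective: alternative
-- what changed: B replaces A's single stateful forward loop with break by a direct decomposition: locate the index of the first description-marker line, pick the title from the last title-marker line before it via a backward scan with early exit, and build the description by a map/filter comprehension over the remaining lines.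
import Mathlib
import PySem

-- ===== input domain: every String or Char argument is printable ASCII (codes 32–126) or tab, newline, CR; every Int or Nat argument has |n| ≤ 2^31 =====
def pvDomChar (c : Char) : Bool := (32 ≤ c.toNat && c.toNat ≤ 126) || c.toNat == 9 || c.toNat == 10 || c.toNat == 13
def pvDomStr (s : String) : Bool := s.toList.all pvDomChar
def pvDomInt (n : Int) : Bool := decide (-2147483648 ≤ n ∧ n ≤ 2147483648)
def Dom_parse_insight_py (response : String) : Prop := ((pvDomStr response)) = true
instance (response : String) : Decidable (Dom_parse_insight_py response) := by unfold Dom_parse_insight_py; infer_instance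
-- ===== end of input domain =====

-- B re-implements the parse as one forward search for the description line plus a backward scan
-- for the last preceding title line ('alternative' decomposition, same cost); return value only.

-- shared helpers: the common Python sub-expressions 'line.strip().lower().startswith(...)'
-- and 'line.split(":", 1)[1].strip()' (the [1] is only reached when a ':' exists)
def pvIsTitle (l : String) : Bool :=
  PySem.Str.startswith (PySem.Str.lower (PySem.Str.strip l)) "title:"

def pvIsDesc (l : String) : Bool :=
  PySem.Str.startswith (PySem.Str.lower (PySem.Str.strip l)) "description:"

def pvAfterColon (line : String) : String :=
  PySem.Str.strip (((PySem.Str.splitMax? line ":" 1).getD []).getD 1 "")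

-- ===== PORT A =====
-- the for-loop over enumerate(lines) carrying (title, description), with 'break' on a description line
def parseLoopA : List String → String → String → (String × String)
  | [], t, d => (t, d)
  | l :: rest, t, d =>
    if pvIsTitle l then parseLoopA rest (pvAfterColon l) d
    else if pvIsDesc l then
      (t, PySem.Str.join " "
        (rest.foldl
          (fun acc lj =>
            if (PySem.Str.strip lj != "") && !(pvIsTitle lj) then acc ++ [PySem.Str.strip lj] else acc)
          [pvAfterColon l]))
    else parseLoopA rest t d

def parse_insight_py (response : String) : List (String × String) :=
  let lines := (PySem.Str.split? response "\n").getD []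
  let td := parseLoopA lines "Proactive Suggestion" response
  [("insight_type", "task_suggestion"),
   ("title", PySem.Str.slice td.1 none (some 200)),
   ("description", PySem.Str.slice td.2 none (some 1000))]

-- ===== PORT B =====
def parse_insight_py_alt (response : String) : List (String × String) :=
  let lines := (PySem.Str.split? response "\n").getD []
  let di := lines.findIdx? pvIsDesc
  let scope := match di with
    | none => lines
    | some i => lines.take i
  let title := match scope.reverse.find? pvIsTitle with
    | some l => pvAfterColon l
    | none => "Proactive Suggestion"
  let description := match di with
    | none => response
    | some i =>
      PySem.Str.join " "
        (pvAfterColon (lines.getD i "") ::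
          ((lines.drop (i + 1)).map PySem.Str.strip).filter
            (fun s => (s != "") && !(PySem.Str.startswith (PySem.Str.lower s) "title:")))
  [("insight_type", "task_suggestion"),
   ("title", PySem.Str.slice title none (some 200)),
   ("description", PySem.Str.slice description none (some 1000))]

-- ===== PRECONDITION & SPEC =====
def Spec_parse_insight_py (response : String) (out : List (String × String)) : Prop := out = parse_insight_py_alt response
instance (response : String) (out : List (String × String)) : Decidable (Spec_parse_insight_py response out) := by unfold Spec_parse_insight_py; infer_instance

-- ===== CLAIM (what is proved, stated in full; the proofs are below) =====
def Claim_equal_parse_insight_py : Prop := ∀ (response : String), Dom_parse_insight_py response → Spec_parse_insight_py response (parse_insight_py response)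

-- ===== LEMMAS AND PROOFS =====

-- a line cannot satisfy both prefixes 'title:' and 'description:'
lemma not_desc_of_title {l : String} (h : pvIsTitle l = true) : pvIsDesc l = false := by
  unfold pvIsTitle at h
  unfold pvIsDesc
  by_contra hd
  rw [Bool.not_eq_false] at hd
  simp only [PySem.Str.startswith_eq, PySem.Chars.startswith_iff] at h hd
  have hle : ("title:".toList).length ≤ ("description:".toList).length := by decide
  have := List.prefix_of_prefix_length_le h hd hle
  revert this
  decide

lemma loopA_eq (lines : List String) (t d : String) :
    parseLoopA lines t d =
      ((match (match lines.findIdx? pvIsDesc with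
               | none => lines
               | some i => lines.take i).reverse.find? pvIsTitle with
        | some l => pvAfterColon l
        | none => t),
       (match lines.findIdx? pvIsDesc with
        | none => d
        | some i =>
          PySem.Str.join " "
            (pvAfterColon (lines.getD i "") ::
              ((lines.drop (i + 1)).map PySem.Str.strip).filter
                (fun s => (s != "") && !(PySem.Str.startswith (PySem.Str.lower s) "title:"))))) := by
  induction lines generalizing t with
  | nil => simp [parseLoopA]
  | cons l rest ih =>
    by_cases ht : pvIsTitle l = true
    · have hd := not_desc_of_title ht
      rw [parseLoopA, if_pos ht, ih]
      simp only [List.findIdx?_cons, hd]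
      cases hidx : rest.findIdx? pvIsDesc with
      | none =>
        simp only [Option.map_none]
        cases hfind : rest.reverse.find? pvIsTitle <;>
          simp [hfind, List.find?, ht]
      | some i =>
        simp only [Option.map_some, List.drop_succ_cons]
        cases hfind : (rest.take i).reverse.find? pvIsTitle <;>
          simp [hfind, List.find?, ht]
    · by_cases hd : pvIsDesc l = true
      · rw [parseLoopA, if_neg ht, if_pos hd]
        rw [PySem.List.foldl_append_if
              (p := fun lj => (PySem.Str.strip lj != "") && !(pvIsTitle lj))
              (f := PySem.Str.strip)]
        simp [List.findIdx?_cons, hd, List.filter_map, pvIsTitle, Function.comp_def, PySem.Str.toList_strip]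
      · rw [parseLoopA, if_neg ht, if_neg hd, ih]
        rw [Bool.not_eq_true] at ht
        simp only [List.findIdx?_cons, hd]
        cases hidx : rest.findIdx? pvIsDesc with
        | none =>
          simp only [Option.map_none]
          cases hfind : rest.reverse.find? pvIsTitle <;>
            simp [hfind, List.find?, ht]
        | some i =>
          simp only [Option.map_some, List.drop_succ_cons]
          cases hfind : (rest.take i).reverse.find? pvIsTitle <;>
            simp [hfind, List.find?, ht]

-- ===== VERDICT (by name: the statement is the Claim_ definition above) =====
theorem parse_insight_py_spec : Claim_equal_parse_insight_py := by
  intro response _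
  unfold Spec_parse_insight_py parse_insight_py parse_insight_py_alt
  simp only [loopA_eq]
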